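-- pv_equiv track=rewrite | github.com/SirLeonardoFerreira/Atividades-ifpi | Atividade 01 - semana 08/questão5_semana8_atividade01.py | ler_numeros_c
-- ===== SOURCE A (Python) =====
-- def ler_numeros_c(num_a, num_b):
--     lista_numeros_c = []
--     num_aux_a = 0
--     num_aux_b = 1
--     for elemento_a in num_a:
--         lista_numeros_c.insert(num_aux_a, elemento_a)
--         num_aux_a += 2
--     for elemento_b in num_b:
--         lista_numeros_c.insert(num_aux_b, elemento_b)
--         num_aux_b += 2
--     return lista_numeros_c
-- ===== SOURCE B (Python) =====
-- from itertools import zip_longest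
--
-- def ler_numeros_c(num_a, num_b):
--     sentinel = object()
--     result = []
--     for x, y in zip_longest(num_a, num_b, fillvalue=sentinel):
--         if x is not sentinel:
--             result.append(x)
--         if y is not sentinel:
--             result.append(y)
--     return result
-- ===== Notes on version B (the rewrite author's own statement) =====
-- stated objective: idiomatic
-- what changed: Replaces the two position-computing insert loops with a single pass over zip_longest pairs flattened in order, using a unique sentinel to skip padding.
import Mathlib
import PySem

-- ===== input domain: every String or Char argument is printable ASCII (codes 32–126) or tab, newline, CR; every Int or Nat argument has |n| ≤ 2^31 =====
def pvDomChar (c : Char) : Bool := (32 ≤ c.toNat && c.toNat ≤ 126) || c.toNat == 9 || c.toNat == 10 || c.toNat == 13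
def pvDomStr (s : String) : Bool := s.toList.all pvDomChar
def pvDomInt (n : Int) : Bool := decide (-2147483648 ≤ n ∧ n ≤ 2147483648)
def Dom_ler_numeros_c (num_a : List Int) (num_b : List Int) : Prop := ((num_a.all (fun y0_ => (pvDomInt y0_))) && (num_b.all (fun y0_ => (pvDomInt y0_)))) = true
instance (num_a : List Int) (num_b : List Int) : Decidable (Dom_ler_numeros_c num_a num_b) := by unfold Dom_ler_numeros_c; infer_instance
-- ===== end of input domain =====

-- B interleaves the two lists in one linear pass over zip_longest pairs instead of
-- A's two loops inserting at computed positions (idiomatic; avoids quadratic insert).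

-- ===== PORT A =====
-- first loop: insert elemento_a at num_aux_a (0,2,4,…); state = (lista, num_aux_a)
-- second loop: insert elemento_b at num_aux_b (1,3,5,…); state = (lista, num_aux_b)
def ler_numeros_c (num_a : List Int) (num_b : List Int) : List Int :=
  let s1 := num_a.foldl (fun (st : List Int × Int) e => (PySem.List.insert st.1 st.2 e, st.2 + 2)) ([], 0)
  let s2 := num_b.foldl (fun (st : List Int × Int) e => (PySem.List.insert st.1 st.2 e, st.2 + 2)) (s1.1, 1)
  s2.1

-- ===== PORT B =====
-- one pass over the zipped pairs: emit x then y, padding (the sentinel) is skipped,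
-- i.e. once one side is exhausted the other side's tail follows unchanged
def pvZipFlatten : List Int → List Int → List Int
  | [], ys => ys
  | x :: xs, [] => x :: pvZipFlatten xs []
  | x :: xs, y :: ys => x :: y :: pvZipFlatten xs ys

def ler_numeros_c_alt (num_a : List Int) (num_b : List Int) : List Int :=
  pvZipFlatten num_a num_b

-- ===== PRECONDITION & SPEC =====
def Spec_ler_numeros_c (num_a : List Int) (num_b : List Int) (out : List Int) : Prop := out = ler_numeros_c_alt num_a num_b
instance (num_a : List Int) (num_b : List Int) (out : List Int) : Decidable (Spec_ler_numeros_c num_a num_b out) := by unfold Spec_ler_numeros_c; infer_instance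

-- ===== CLAIM (what is proved, stated in full; the proofs are below) =====
def Claim_equal_ler_numeros_c : Prop := ∀ (num_a : List Int) (num_b : List Int), Dom_ler_numeros_c num_a num_b → Spec_ler_numeros_c num_a num_b (ler_numeros_c num_a num_b)

-- ===== LEMMAS AND PROOFS =====

-- Python's list.insert clamps: a position at or past the end appends.
theorem pv_insert_ge (xs : List Int) (p : Int) (v : Int) (h : (xs.length : Int) ≤ p) :
    PySem.List.insert xs p v = xs ++ [v] := by
  have h0 : ¬ p < 0 := by omega
  simp only [PySem.List.insert, PySem.List.sliceIndices]
  simp only [if_neg (by omega : ¬ (1:Int) < 0), h0]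
  have hm : min p (xs.length : Int) = (xs.length : Int) := by omega
  simp [hm]

-- inserting in the middle: position = length of the prefix
theorem pv_insert_mid (pre suf : List Int) (v : Int) :
    PySem.List.insert (pre ++ suf) (pre.length : Int) v = pre ++ v :: suf := by
  rw [PySem.List.insert_natCast _ _ _ (by simp)]
  simp

-- loop 1 (and the tail of loop 2): every insert happens at a position ≥ the current
-- length, so the loop just appends its elements in order
theorem pv_loop_ge (l : List Int) (p : Int) (ys : List Int)
    (h : (l.length : Int) ≤ p) :
    (ys.foldl (fun (st : List Int × Int) e => (PySem.List.insert st.1 st.2 e, st.2 + 2)) (l, p)).1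
      = l ++ ys := by
  induction ys generalizing l p with
  | nil => simp
  | cons y ys ih =>
    simp only [List.foldl_cons]
    rw [pv_insert_ge l p y h, ih (l ++ [y]) (p + 2) (by simp; omega)]
    simp

-- loop 2 invariant: list = pre ++ rest, position = pre.length + 1
theorem pv_loop_mid (ys : List Int) (pre rest : List Int) :
    (ys.foldl (fun (st : List Int × Int) e => (PySem.List.insert st.1 st.2 e, st.2 + 2))
        (pre ++ rest, (pre.length : Int) + 1)).1
      = pre ++ pvZipFlatten rest ys := by
  induction ys generalizing pre rest with
  | nil =>
    cases rest with
    | nil => simp [pvZipFlatten]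
    | cons r rs =>
      simp only [List.foldl_nil]
      have : pvZipFlatten (r :: rs) [] = r :: pvZipFlatten rs [] := rfl
      rw [this]
      have h2 : pvZipFlatten rs ([] : List Int) = rs := by
        induction rs with
        | nil => rfl
        | cons a as iha => simp [pvZipFlatten, iha]
      simp [h2]
  | cons y ys ih =>
    cases rest with
    | nil =>
      simp only [List.foldl_cons, List.append_nil]
      rw [pv_insert_ge pre _ y (by omega)]
      rw [pv_loop_ge (pre ++ [y]) _ ys (by simp)]
      have h2 : pvZipFlatten ([] : List Int) (y :: ys) = y :: ys := rfl
      simp [h2]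
    | cons r rs =>
      simp only [List.foldl_cons]
      have hpos : (pre.length : Int) + 1 = (((pre ++ [r]).length : Nat) : Int) := by simp
      rw [hpos, show (pre ++ r :: rs) = (pre ++ [r]) ++ rs by simp]
      rw [pv_insert_mid (pre ++ [r]) rs y]
      have : (pre ++ [r]) ++ y :: rs = (pre ++ [r, y]) ++ rs := by simp
      rw [this]
      have hlen : ((((pre ++ [r]).length : Nat) : Int) + 2) = ((pre ++ [r, y]).length : Int) + 1 := by
        simp; omega
      rw [hlen, ih (pre ++ [r, y]) rs]
      simp [pvZipFlatten]

-- ===== VERDICT (by name: the statement is the Claim_ definition above) =====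
theorem ler_numeros_c_spec : Claim_equal_ler_numeros_c := by
  intro num_a num_b _
  unfold Spec_ler_numeros_c ler_numeros_c ler_numeros_c_alt
  have h1 := pv_loop_ge [] 0 num_a (by simp)
  simp only []
  rw [h1]
  have := pv_loop_mid num_b [] num_a
  simpa using this
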